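-- pv_equiv track=rewrite | github.com/thmslmr/timebomb-client | timebomb/forms/utils.py | summary_deck
-- ===== SOURCE A (Python) =====
-- def card_view(value: str) -> str:
--     """Create string card view.
--
--     Args:
--         value (str): Value of the card
--
--     Returns:
--         str: The card view.
--     """
--     return f"┌───┐\n│ {value} │\n└───┘"
--
-- def summary_deck(deck: dict) -> str:
--     """Create deck summary view (used for card found / left).
--
--     Args:
--         deck (dict): Dict where key if card and value is count.
--
--     Returns:
--         str: The deck summary view.
--     """
--     if not deck:
--         return ""
--
--     lines = [card_view(card).split("\n") for card in deck.keys()]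
--
--     for i, (k, v) in enumerate(deck.items()):
--         lines.insert(1 + (i * 2), ["   ", f"x{v} ", "   "])
--
--     output = ""
--
--     for line in zip(*lines):
--         output += " ".join(line) + "\n"
--
--     return output
-- ===== SOURCE B (Python) =====
-- def summary_deck(deck: dict) -> str:
--     """Create deck summary view: one pass building the three output rows directly."""
--     if not deck:
--         return ""
--     top, mid, bot = [], [], []
--     for k, v in deck.items():
--         c = f"┌───┐\n│ {k} │\n└───┘".split("\n")
--         top += [c[0], "   "]
--         mid += [c[1], f"x{v} "]
--         bot += [c[2], "   "]
--     return " ".join(top) + "\n" + " ".join(mid) + "\n" + " ".join(bot) + "\n"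
-- ===== Notes on version B (the rewrite author's own statement) =====
-- stated objective: faster
-- what changed: B drops A's per-card list.insert splicing of separator columns and the zip(*lines) transpose: one pass over deck.items() appends each card's three view lines and its count column directly to three row accumulators that are then joined.
import Mathlib
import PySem

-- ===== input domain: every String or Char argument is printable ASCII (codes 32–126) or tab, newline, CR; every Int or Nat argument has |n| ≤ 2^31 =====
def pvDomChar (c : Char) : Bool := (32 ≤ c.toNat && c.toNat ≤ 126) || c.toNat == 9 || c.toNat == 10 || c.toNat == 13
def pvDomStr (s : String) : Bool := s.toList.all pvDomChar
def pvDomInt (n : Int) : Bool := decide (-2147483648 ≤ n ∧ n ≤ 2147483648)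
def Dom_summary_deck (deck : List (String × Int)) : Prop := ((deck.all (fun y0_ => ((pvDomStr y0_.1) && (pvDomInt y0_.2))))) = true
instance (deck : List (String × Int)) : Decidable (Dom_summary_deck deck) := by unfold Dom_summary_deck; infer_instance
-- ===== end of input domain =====

-- B replaces A's quadratic insert-splicing of separator columns and the zip(*lines) transpose
-- by a single pass appending each card's pieces to three row accumulators (objective: faster).

-- ===== PORT A =====
def card_view (value : String) : String := "┌───┐\n│ " ++ value ++ " │\n└───┘"

-- port of zip(*lines): rows of heads until some list is exhausted (exact for zip of lists)
def pvZipStar (ls : List (List String)) : List (List String) :=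
  if h : ls.isEmpty ∨ ls.any List.isEmpty then []
  else (ls.map (fun x => x.headD "")) :: pvZipStar (ls.map List.tail)
termination_by (ls.headD []).length
decreasing_by
  cases ls with
  | nil => simp at h
  | cons a t =>
    cases a with
    | nil => simp at h
    | cons c cs => simp

def summary_deck (deck : List (String × Int)) : String :=
  let d := PySem.Dict.ofList deck
  if d.items.isEmpty then ""
  else
    let lines := d.keys.map (fun card => (PySem.Str.split? (card_view card) "\n").getD [])
    -- .split("\n"): sep is the non-empty literal "\n", so split? is always `some`
    let lines := (PySem.List.enumerate d.items).foldl
      (fun ls ikv =>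
        PySem.List.insert ls (1 + ikv.1 * 2) ["   ", "x" ++ PySem.Int.toStr ikv.2.2 ++ " ", "   "])
      lines
    (pvZipStar lines).foldl (fun output line => output ++ PySem.Str.join " " line ++ "\n") ""

-- ===== PORT B =====
def summary_deck_alt (deck : List (String × Int)) : String :=
  let d := PySem.Dict.ofList deck
  if d.items.isEmpty then ""
  else
    let tmb := d.items.foldl
      (fun tmb kv =>
        -- c = f"┌───┐\n│ {k} │\n└───┘".split("\n")  (split? is `some`: the sep "\n" is non-empty)
        let c := (PySem.Str.split? ("┌───┐\n│ " ++ kv.1 ++ " │\n└───┘") "\n").getD []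
        -- c[0]/c[1]/c[2]: the split has ≥ 3 pieces (two newlines in the f-string), so the
        -- indices are always in range and getD's default is never used
        (tmb.1 ++ [c.getD 0 "", "   "],
         tmb.2.1 ++ [c.getD 1 "", "x" ++ PySem.Int.toStr kv.2 ++ " "],
         tmb.2.2 ++ [c.getD 2 "", "   "]))
      (([], [], []) : List String × List String × List String)
    PySem.Str.join " " tmb.1 ++ "\n" ++ PySem.Str.join " " tmb.2.1 ++ "\n" ++
      PySem.Str.join " " tmb.2.2 ++ "\n"

-- ===== PRECONDITION & SPEC =====
def Spec_summary_deck (deck : List (String × Int)) (out : String) : Prop := out = summary_deck_alt deck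
instance (deck : List (String × Int)) (out : String) : Decidable (Spec_summary_deck deck out) := by
  unfold Spec_summary_deck; infer_instance

-- ===== CLAIM (what is proved, stated in full; the proofs are below) =====
def Claim_equal_summary_deck : Prop := ∀ (deck : List (String × Int)), Dom_summary_deck deck → Spec_summary_deck deck (summary_deck deck)

-- ===== LEMMAS AND PROOFS =====

-- `splitOn.go` produces one more piece than there are separators left
theorem pv_go_len (l : List Char) (cur : List Char) (acc : List (List Char)) (fuel : ℕ)
    (hf : l.length ≤ fuel) :
    (PySem.Chars.splitOn.go ['\n'] fuel l cur acc).length = l.count '\n' + acc.length + 1 := by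
  induction l generalizing fuel cur acc with
  | nil => cases fuel <;> simp [PySem.Chars.splitOn.go]
  | cons c rest ih =>
    cases fuel with
    | zero => simp at hf
    | succ f =>
      by_cases hc : c = '\n'
      · have hpre : (['\n'].isPrefixOf (c :: rest)) = true := by simp [List.isPrefixOf, hc]
        simp only [PySem.Chars.splitOn.go, hpre, if_true]
        rw [show List.drop ['\n'].length (c :: rest) = rest from by simp]
        rw [ih _ _ _ (by simpa using hf)]
        simp [List.count_cons, hc]
        omega
      · have hpre : ¬ (['\n'].isPrefixOf (c :: rest) = true) := by
          simp only [List.isPrefixOf]; simp; exact fun h => hc h.symm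
        simp only [PySem.Chars.splitOn.go, hpre]
        rw [if_neg (by simp)]
        rw [ih _ _ _ (by simpa using hf)]
        simp [List.count_cons, hc]

-- the pieces of one card's view, and the separator column that follows it
def pvSplit (k : String) : List String :=
  (PySem.Str.split? ("┌───┐\n│ " ++ k ++ " │\n└───┘") "\n").getD []
def pvSep (v : Int) : List String := ["   ", "x" ++ PySem.Int.toStr v ++ " ", "   "]
def pvInter (l : List (String × Int)) : List (List String) :=
  l.flatMap (fun kv => [pvSplit kv.1, pvSep kv.2])

theorem pv_split_len (k : String) : 3 ≤ (pvSplit k).length := by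
  unfold pvSplit
  simp only [PySem.Str.split?, PySem.Chars.split?, PySem.Chars.splitOn]
  rw [if_neg (by simp)]
  simp only [Option.getD_some, Option.map_some, List.length_map]
  rw [show "\n".toList = ['\n'] from by decide]
  rw [pv_go_len _ _ _ _ (by simp)]
  have : ("┌───┐\n│ " ++ k ++ " │\n└───┘").toList.count '\n' = k.toList.count '\n' + 2 := by
    simp [List.count_append, List.count_cons]
  omega

-- pvZipStar stops at the shortest row: with all rows ≥ n long and one exactly n, it is
-- the n-row transpose
theorem pv_zipmin (n : ℕ) : ∀ (ls : List (List String)), ls ≠ [] →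
    (∀ x ∈ ls, n ≤ x.length) → (∃ x ∈ ls, x.length = n) →
    pvZipStar ls = (List.range n).map (fun i => ls.map (fun x => x.getD i "")) := by
  induction n with
  | zero =>
    intro ls hne hlen hex
    rw [pvZipStar]
    rw [dif_pos]
    · simp
    · right
      obtain ⟨x, hx, hxl⟩ := hex
      simp only [List.any_eq_true]
      exact ⟨x, hx, by simpa using List.length_eq_zero_iff.mp hxl⟩
  | succ n ih =>
    intro ls hne hlen hex
    rw [pvZipStar]
    rw [dif_neg]
    · rw [ih (ls.map List.tail) (by simpa using hne)
        (by intro x hx; obtain ⟨y, hy, rfl⟩ := List.mem_map.mp hx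
            have := hlen y hy; simp; omega)
        (by obtain ⟨x, hx, hxl⟩ := hex
            exact ⟨x.tail, List.mem_map_of_mem hx, by simp [hxl]⟩)]
      rw [List.range_succ_eq_map]
      simp only [List.map_cons, List.map_map]
      congr 1
      · apply List.map_congr_left
        intro x hx
        have := hlen x hx
        cases x with
        | nil => simp at this
        | cons a t => simp
      · apply List.map_congr_left
        intro i _
        simp only [Function.comp]
        apply List.map_congr_left
        intro x hx
        have := hlen x hx
        cases x with
        | nil => simp at this
        | cons a t => simp [Nat.succ_eq_add_one]
    · intro h
      rcases h with h | h
      · exact hne (List.isEmpty_iff.mp h)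
      · simp only [List.any_eq_true] at h
        obtain ⟨x, hx, hxe⟩ := h
        have := hlen x hx
        rw [List.isEmpty_iff.mp hxe] at this
        simp at this

-- the enumerated insert-splicing loop interleaves separator columns after each card
theorem pv_inserts (t : List (String × Int)) : ∀ (P : List (List String)) (j : ℕ),
    P.length = 2 * j →
    (PySem.List.enumerate t (j : ℤ)).foldl
      (fun ls ikv =>
        PySem.List.insert ls (1 + ikv.1 * 2) ["   ", "x" ++ PySem.Int.toStr ikv.2.2 ++ " ", "   "])
      (P ++ t.map (fun kv => pvSplit kv.1)) = P ++ pvInter t := by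
  induction t with
  | nil => intro P j hP; simp [pvInter]
  | cons kv t' ih =>
    intro P j hP
    rw [PySem.List.enumerate_cons, List.foldl_cons]
    have hidx : (1 + (j : ℤ) * 2) = ((P.length + 1 : ℕ) : ℤ) := by push_cast; omega
    have hins : PySem.List.insert (P ++ (kv :: t').map (fun kv => pvSplit kv.1))
        (1 + (j : ℤ) * 2) ["   ", "x" ++ PySem.Int.toStr kv.2 ++ " ", "   "]
        = (P ++ [pvSplit kv.1, pvSep kv.2]) ++ t'.map (fun kv => pvSplit kv.1) := by
      rw [hidx, PySem.List.insert_natCast _ _ _ (by simp)]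
      rw [List.map_cons]
      simp [pvSep, List.take_append, List.drop_append,
        List.take_of_length_le (Nat.le_succ_of_le le_rfl),
        List.drop_of_length_le (Nat.le_succ_of_le le_rfl)]
    rw [hins]
    have : (j : ℤ) + 1 = ((j + 1 : ℕ) : ℤ) := by push_cast; ring
    rw [this, ih (P ++ [pvSplit kv.1, pvSep kv.2]) (j + 1) (by simp [hP]; omega)]
    simp [pvInter]

-- B's three-accumulator fold, in closed form
theorem pv_bfold (t : List (String × Int)) : ∀ (a b c : List String),
    t.foldl
      (fun tmb kv =>
        (tmb.1 ++ [(pvSplit kv.1).getD 0 "", "   "],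
         tmb.2.1 ++ [(pvSplit kv.1).getD 1 "", "x" ++ PySem.Int.toStr kv.2 ++ " "],
         tmb.2.2 ++ [(pvSplit kv.1).getD 2 "", "   "]))
      (a, b, c)
    = (a ++ t.flatMap (fun kv => [(pvSplit kv.1).getD 0 "", "   "]),
       b ++ t.flatMap (fun kv => [(pvSplit kv.1).getD 1 "", "x" ++ PySem.Int.toStr kv.2 ++ " "]),
       c ++ t.flatMap (fun kv => [(pvSplit kv.1).getD 2 "", "   "])) := by
  induction t with
  | nil => simp
  | cons kv t' ih => intro a b c; rw [List.foldl_cons, ih]; simp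

-- ===== VERDICT (by name: the statement is the Claim_ definition above) =====
theorem summary_deck_spec : Claim_equal_summary_deck := by
  intro deck _
  unfold Spec_summary_deck
  unfold summary_deck summary_deck_alt
  dsimp only
  rw [show (PySem.Dict.ofList deck).keys = ((PySem.Dict.ofList deck).items).map Prod.fst from rfl]
  generalize (PySem.Dict.ofList deck).items = l
  cases hln : l.isEmpty
  · have hlne : l ≠ [] := fun h => by simp [h] at hln
    simp only [Bool.false_eq_true, if_false]
    -- A's first pass produces each card's split pieces
    have hlines : (l.map Prod.fst).map
        (fun card => (PySem.Str.split? (card_view card) "\n").getD [])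
        = [] ++ l.map (fun kv => pvSplit kv.1) := by
      rw [List.map_map, List.nil_append]
      rfl
    rw [hlines]
    have hins := pv_inserts l [] 0 (by simp)
    rw [Nat.cast_zero] at hins
    rw [hins, List.nil_append]
    -- the transpose keeps exactly the first three pieces of every column
    have hmem : ∀ x ∈ pvInter l, 3 ≤ x.length := by
      intro x hx
      simp only [pvInter, List.mem_flatMap, List.mem_cons, List.not_mem_nil, or_false] at hx
      obtain ⟨kv, -, hx⟩ := hx
      rcases hx with rfl | rfl
      · exact pv_split_len kv.1
      · simp [pvSep]
    have hex : ∃ x ∈ pvInter l, x.length = 3 := by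
      cases l with
      | nil => exact absurd rfl hlne
      | cons kv t => exact ⟨pvSep kv.2, by simp [pvInter], by simp [pvSep]⟩
    have hne : pvInter l ≠ [] := by
      cases l with
      | nil => exact absurd rfl hlne
      | cons a t => simp [pvInter]
    rw [pv_zipmin 3 (pvInter l) hne hmem hex]
    rw [show List.range 3 = [0, 1, 2] from rfl]
    rw [show (fun (tmb : List String × List String × List String) (kv : String × Int) =>
          ((tmb.1 ++ [((PySem.Str.split? ("┌───┐\n│ " ++ kv.1 ++ " │\n└───┘") "\n").getD []).getD 0 "", "   "],
            tmb.2.1 ++ [((PySem.Str.split? ("┌───┐\n│ " ++ kv.1 ++ " │\n└───┘") "\n").getD []).getD 1 "",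
              "x" ++ PySem.Int.toStr kv.2 ++ " "],
            tmb.2.2 ++ [((PySem.Str.split? ("┌───┐\n│ " ++ kv.1 ++ " │\n└───┘") "\n").getD []).getD 2 "", "   "])))
        = (fun tmb kv =>
          (tmb.1 ++ [(pvSplit kv.1).getD 0 "", "   "],
           tmb.2.1 ++ [(pvSplit kv.1).getD 1 "", "x" ++ PySem.Int.toStr kv.2 ++ " "],
           tmb.2.2 ++ [(pvSplit kv.1).getD 2 "", "   "])) from rfl]
    rw [pv_bfold l [] [] []]
    simp only [List.map_cons, List.map_nil, List.foldl_cons, List.foldl_nil, List.nil_append]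
    have h0 : (pvInter l).map (fun x => x.getD 0 "")
        = l.flatMap (fun kv => [(pvSplit kv.1).getD 0 "", "   "]) := by
      simp [pvInter, List.map_flatMap, pvSep]
    have h1 : (pvInter l).map (fun x => x.getD 1 "")
        = l.flatMap (fun kv => [(pvSplit kv.1).getD 1 "", "x" ++ PySem.Int.toStr kv.2 ++ " "]) := by
      simp [pvInter, List.map_flatMap, pvSep]
    have h2 : (pvInter l).map (fun x => x.getD 2 "")
        = l.flatMap (fun kv => [(pvSplit kv.1).getD 2 "", "   "]) := by
      simp [pvInter, List.map_flatMap, pvSep]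
    rw [h0, h1, h2]
    simp [String.append_assoc]
  · simp
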